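-- pv_equiv track=rewrite | github.com/adarshnamsani/exam | list_assgn.py | square2
-- ===== SOURCE A (Python) =====
-- def square2(first,last):
--
-- #    squares=[1,4,9,16,25,36,49,64,81,100,121,144,169,196,225,256,289,324,361,400,441,484,529,576,625,676,729,784,841,900]
--
--     sq=[]
--     while first <= last:
--         sq.append(first**2)
--         first +=1
--
--     l=[]
--     l.extend(sq[5:])
--
--     return l
-- ===== SOURCE B (Python) =====
-- def square2(first, last):
--     return [i * i for i in range(first + 5, last + 1)]
-- ===== Notes on version B (the rewrite author's own statement) =====
-- stated objective: simpler
-- what changed: Replaces A's build-the-full-squares-list-then-slice-off-the-first-5 two passes with a single range comprehension starting at first+5, producing the result directly.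
import Mathlib
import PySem

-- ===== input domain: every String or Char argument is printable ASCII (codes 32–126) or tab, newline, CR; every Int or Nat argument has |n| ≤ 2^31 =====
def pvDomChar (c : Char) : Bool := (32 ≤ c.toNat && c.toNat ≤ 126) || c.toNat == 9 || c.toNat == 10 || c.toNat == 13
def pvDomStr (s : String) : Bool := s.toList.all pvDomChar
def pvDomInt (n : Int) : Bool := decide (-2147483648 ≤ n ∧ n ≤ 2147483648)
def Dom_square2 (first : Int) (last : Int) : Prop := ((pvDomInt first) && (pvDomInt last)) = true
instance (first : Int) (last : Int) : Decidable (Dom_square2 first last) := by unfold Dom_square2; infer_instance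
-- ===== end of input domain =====

-- B replaces A's build-all-squares-then-slice-off-5 two passes with one range comprehension
-- starting at first+5 (objective: simpler).

-- ===== PORT A =====
-- A's while loop: append first**2, first += 1, while first <= last.
def square2Loop (first last : Int) (sq : List Int) : List Int :=
  if first ≤ last then square2Loop (first + 1) last (sq ++ [first ^ 2]) else sq
termination_by (last + 1 - first).toNat
decreasing_by omega

def square2 (first : Int) (last : Int) : List Int :=
  let sq := square2Loop first last []
  let l : List Int := []
  l ++ PySem.List.slice sq (some 5) none     -- l.extend(sq[5:])

-- ===== PORT B =====
-- Source B: [i * i for i in range(first + 5, last + 1)]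
def square2_alt (first : Int) (last : Int) : List Int :=
  (PySem.List.pyRange (first + 5) (last + 1) 1).map (fun i => i * i)

-- ===== PRECONDITION & SPEC =====
def Spec_square2 (first : Int) (last : Int) (out : List Int) : Prop := out = square2_alt first last
instance (first : Int) (last : Int) (out : List Int) : Decidable (Spec_square2 first last out) := by unfold Spec_square2; infer_instance

-- ===== CLAIM (what is proved, stated in full; the proofs are below) =====
def Claim_equal_square2 : Prop := ∀ (first : Int) (last : Int), Dom_square2 first last → Spec_square2 first last (square2 first last)

-- ===== LEMMAS AND PROOFS =====

-- A's loop builds exactly the squares of range(first, last+1), appended to the accumulator.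
theorem square2Loop_eq (first last : Int) (sq : List Int) :
    square2Loop first last sq = sq ++ (PySem.List.pyRange first (last + 1) 1).map (fun i => i ^ 2) := by
  by_cases h : first ≤ last
  · rw [square2Loop, if_pos h, square2Loop_eq (first + 1) last,
      PySem.List.pyRange_one_cons (by omega : first < last + 1)]
    simp
  · rw [square2Loop, if_neg h, PySem.List.pyRange_one_eq_nil (by omega)]
    simp
termination_by (last + 1 - first).toNat
decreasing_by omega

-- Dropping k elements of range(a, b) is range(a+k, b).
theorem drop_pyRange (k : Nat) (a b : Int) :
    (PySem.List.pyRange a b 1).drop k = PySem.List.pyRange (a + k) b 1 := by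
  induction k generalizing a with
  | zero => simp
  | succ n ih =>
    by_cases h : a < b
    · rw [PySem.List.pyRange_one_cons h, List.drop_succ_cons, ih]
      have hc2 : a + 1 + (n:Int) = a + ((n + 1 : Nat) : Int) := by push_cast; ring
      rw [hc2]
    · rw [PySem.List.pyRange_one_eq_nil (by omega),
        PySem.List.pyRange_one_eq_nil (by omega : b ≤ a + (n + 1 : Nat))]
      simp

-- ===== VERDICT (by name: the statement is the Claim_ definition above) =====
theorem square2_spec : Claim_equal_square2 := by
  intro first last _
  show _ = _
  rw [square2, square2_alt]
  simp only [square2Loop_eq, List.nil_append]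
  rw [PySem.List.slice_from _ (by norm_num : (0:Int) ≤ 5), ← List.map_drop]
  norm_num [drop_pyRange]
  intro i _ _
  ring
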